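-- pv_equiv track=rewrite | github.com/ryangerardwilson/xyz | structured_command.py | _split_entries
-- ===== SOURCE A (Python) =====
-- from typing import Iterable, List
--
-- def _split_entries(text: str) -> List[str]:
--     entries: List[str] = []
--     current: List[str] = []
--     for line in text.splitlines():
--         stripped = line.strip()
--         if not stripped:
--             if current:
--                 entries.append(" ".join(current))
--                 current = []
--             continue
--         current.append(stripped)
--     if current:
--         entries.append(" ".join(current))
--     return entries
-- ===== SOURCE B (Python) =====
-- from typing import List
--
--
-- def _split_entries(text: str) -> List[str]:
--     # Run-scanning rewrite: pre-strip all lines, then consume maximal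
--     # non-blank runs directly instead of A's accumulator/flush state machine.
--     lines = [line.strip() for line in text.splitlines()]
--     entries: List[str] = []
--     while lines:
--         head, lines = lines[0], lines[1:]
--         if not head:
--             continue
--         run = [head]
--         while lines and lines[0]:
--             run.append(lines[0])
--             lines = lines[1:]
--         entries.append(" ".join(run))
--     return entries
-- ===== Notes on version B (the rewrite author's own statement) =====
-- stated objective: alternative
-- what changed: Replaces A's accumulator-with-post-loop-flush state machine by pre-stripping all lines and then scanning maximal non-blank runs, joining each run as it is consumed (no pending 'current' and no final flush).
import Mathlib
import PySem

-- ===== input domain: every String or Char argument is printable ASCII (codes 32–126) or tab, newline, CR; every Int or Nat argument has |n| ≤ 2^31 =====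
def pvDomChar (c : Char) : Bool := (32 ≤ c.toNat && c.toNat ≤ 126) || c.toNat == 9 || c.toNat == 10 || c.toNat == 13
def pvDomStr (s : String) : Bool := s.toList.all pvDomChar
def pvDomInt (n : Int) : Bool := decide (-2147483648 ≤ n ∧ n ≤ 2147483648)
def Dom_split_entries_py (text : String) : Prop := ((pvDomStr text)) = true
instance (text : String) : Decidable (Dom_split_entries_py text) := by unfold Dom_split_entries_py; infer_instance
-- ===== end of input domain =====

-- B replaces A's accumulator/flush state machine by a scan over pre-stripped lines
-- that consumes maximal non-blank runs (objective: alternative decomposition).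

-- ===== PORT A =====
-- A-side helper: the body of A's for-loop (one fold step over the state (entries, current))
def pvStep (st : List String × List String) (line : String) : List String × List String :=
  let stripped := PySem.Str.strip line
  if stripped = "" then
    if st.2 ≠ [] then (st.1 ++ [PySem.Str.join " " st.2], []) else st
  else (st.1, st.2 ++ [stripped])

def split_entries_py (text : String) : List String :=
  let st := (PySem.Str.splitlines text).foldl pvStep ([], [])
  if st.2 ≠ [] then st.1 ++ [PySem.Str.join " " st.2] else st.1

-- ===== PORT B =====
-- B-side helper: the inner while loop ('run.append(lines[0]); lines = lines[1:]')
def pvTakeRun : List String → List String → List String × List String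
  | run, [] => (run, [])
  | run, s :: rest => if s = "" then (run, s :: rest) else pvTakeRun (run ++ [s]) rest

theorem pvTakeRun_snd_le (run l : List String) : (pvTakeRun run l).2.length ≤ l.length := by
  induction l generalizing run with
  | nil => simp [pvTakeRun]
  | cons s rest ih =>
    simp only [pvTakeRun]
    split
    · simp
    · exact Nat.le_trans (ih _) (Nat.le_succ _)

-- B-side helper: the outer while loop over the remaining stripped lines
def pvChunksLoop : List String → List String → List String
  | entries, [] => entries
  | entries, head :: rest =>
    if head = "" then pvChunksLoop entries rest
    else
      pvChunksLoop (entries ++ [PySem.Str.join " " (pvTakeRun [head] rest).1])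
        (pvTakeRun [head] rest).2
termination_by _ l => l.length
decreasing_by
  · simp
  · exact Nat.lt_succ_of_le (pvTakeRun_snd_le [head] rest)

def split_entries_py_alt (text : String) : List String :=
  pvChunksLoop [] ((PySem.Str.splitlines text).map PySem.Str.strip)

-- ===== PRECONDITION & SPEC =====
def Spec_split_entries_py (text : String) (out : List String) : Prop := out = split_entries_py_alt text
instance (text : String) (out : List String) : Decidable (Spec_split_entries_py text out) := by unfold Spec_split_entries_py; infer_instance

-- ===== CLAIM (what is proved, stated in full; the proofs are below) =====
def Claim_equal_split_entries_py : Prop := ∀ (text : String), Dom_split_entries_py text → Spec_split_entries_py text (split_entries_py text)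

-- ===== LEMMAS AND PROOFS =====

-- the post-loop flush of A, as a function on its state
def pvFinish (st : List String × List String) : List String :=
  if st.2 ≠ [] then st.1 ++ [PySem.Str.join " " st.2] else st.1

theorem pv_fold_loop (ls : List String) : ∀ (es cur : List String),
    pvFinish (ls.foldl pvStep (es, cur)) =
      if cur = [] then pvChunksLoop es (ls.map PySem.Str.strip)
      else pvChunksLoop (es ++ [PySem.Str.join " " (pvTakeRun cur (ls.map PySem.Str.strip)).1])
             (pvTakeRun cur (ls.map PySem.Str.strip)).2 := by
  induction ls with
  | nil =>
    intro es cur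
    by_cases h : cur = [] <;> simp [pvFinish, pvTakeRun, pvChunksLoop, h]
  | cons l t ih =>
    intro es cur
    by_cases hs : PySem.Str.strip l = ""
    · by_cases hc : cur = []
      · simp [pvStep, hs, hc, ih, pvChunksLoop]
      · simp [pvStep, hs, hc, ih, pvTakeRun, pvChunksLoop]
    · by_cases hc : cur = []
      · subst hc
        simp [pvStep, hs, ih, pvChunksLoop]
      · simp [pvStep, hs, hc, ih, pvTakeRun]

-- ===== VERDICT (by name: the statement is the Claim_ definition above) =====
theorem split_entries_py_spec : Claim_equal_split_entries_py := by
  intro text _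
  unfold Spec_split_entries_py split_entries_py split_entries_py_alt
  have h := pv_fold_loop (PySem.Str.splitlines text) [] []
  simpa [pvFinish] using h
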